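-- pv_equiv track=rewrite | github.com/ALGABANIGROUP/GTS_Logistics_Platform | backend/email_bot/intelligent_processor.py | _determine_target_bot
-- ===== SOURCE A (Python) =====
-- from typing import Any, Dict, List
--
-- def _determine_target_bot(email: Dict[str, Any], analysis: Dict[str, Any]) -> str:
--     keywords = analysis.get("keywords", set())
--     rules = {
--         "finance_bot": [
--             lambda: "invoice" in keywords,
--             lambda: "payment" in keywords,
--             lambda: "account" in keywords,
--             lambda: email.get("to") in {"accounts@gabanilogistics.com", "finance@gabanilogistics.com"},
--         ],
--         "customer_service": [
--             lambda: "support" in keywords,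
--             lambda: "help" in keywords,
--             lambda: "complaint" in keywords,
--             lambda: email.get("to") == "customers@gabanilogistics.com",
--         ],
--         "freight_broker": [
--             lambda: "shipment" in keywords,
--             lambda: "quote" in keywords,
--             lambda: "carrier" in keywords,
--             lambda: email.get("to") == "freight@gabanilogistics.com",
--         ],
--         "documents_manager": [
--             lambda: "document" in keywords,
--             lambda: "approval" in keywords,
--             lambda: "sign" in keywords,
--             lambda: email.get("to") == "doccontrol@gabanilogistics.com",
--         ],
--         "operations_manager": [
--             lambda: "driver" in keywords,
--             lambda: "schedule" in keywords,
--             lambda: "dispatch" in keywords,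
--             lambda: email.get("to") in {"driver@gabanistore.com", "operations@gabanilogistics.com"},
--         ],
--         "safety_manager": [
--             lambda: "safety" in keywords,
--             lambda: "accident" in keywords,
--             lambda: "incident" in keywords,
--             lambda: email.get("to") == "safety@gabanistore.com",
--         ],
--         "security_manager": [
--             lambda: "security" in keywords,
--             lambda: "breach" in keywords,
--             lambda: "investigation" in keywords,
--             lambda: email.get("to") == "security@gabanistore.com",
--         ],
--     }
--     for bot_name, conditions in rules.items():
--         if any(condition() for condition in conditions):
--             return bot_name
--     return "customer_service"
-- ===== SOURCE B (Python) =====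
-- # B: inverted keyword/recipient index + priority list instead of scanning per-bot lambda rules.
-- _KEYWORD_TO_BOT = {
--     "invoice": "finance_bot", "payment": "finance_bot", "account": "finance_bot",
--     "support": "customer_service", "help": "customer_service", "complaint": "customer_service",
--     "shipment": "freight_broker", "quote": "freight_broker", "carrier": "freight_broker",
--     "document": "documents_manager", "approval": "documents_manager", "sign": "documents_manager",
--     "driver": "operations_manager", "schedule": "operations_manager", "dispatch": "operations_manager",
--     "safety": "safety_manager", "accident": "safety_manager", "incident": "safety_manager",
--     "security": "security_manager", "breach": "security_manager", "investigation": "security_manager",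
-- }
-- _RECIPIENT_TO_BOT = {
--     "accounts@gabanilogistics.com": "finance_bot",
--     "finance@gabanilogistics.com": "finance_bot",
--     "customers@gabanilogistics.com": "customer_service",
--     "freight@gabanilogistics.com": "freight_broker",
--     "doccontrol@gabanilogistics.com": "documents_manager",
--     "driver@gabanistore.com": "operations_manager",
--     "operations@gabanilogistics.com": "operations_manager",
--     "safety@gabanistore.com": "safety_manager",
--     "security@gabanistore.com": "security_manager",
-- }
-- _PRIORITY = ["finance_bot", "customer_service", "freight_broker", "documents_manager",
--              "operations_manager", "safety_manager", "security_manager"]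
--
-- def _determine_target_bot(email, analysis):
--     keywords = analysis.get("keywords", set())
--     candidates = set()
--     for kw in keywords:
--         bot = _KEYWORD_TO_BOT.get(kw)
--         if bot is not None:
--             candidates.add(bot)
--     bot = _RECIPIENT_TO_BOT.get(email.get("to"))
--     if bot is not None:
--         candidates.add(bot)
--     for bot in _PRIORITY:
--         if bot in candidates:
--             return bot
--     return "customer_service"
-- ===== Notes on version B (the rewrite author's own statement) =====
-- stated objective: idiomatic
-- what changed: Replaces the per-bot scan over lists of condition lambdas by a precomputed inverted index (keyword->bot and recipient->bot dicts) that collects candidate bots in one pass over the email's keywords plus one recipient lookup, then returns the candidate earliest in an explicit priority list.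
import Mathlib
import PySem

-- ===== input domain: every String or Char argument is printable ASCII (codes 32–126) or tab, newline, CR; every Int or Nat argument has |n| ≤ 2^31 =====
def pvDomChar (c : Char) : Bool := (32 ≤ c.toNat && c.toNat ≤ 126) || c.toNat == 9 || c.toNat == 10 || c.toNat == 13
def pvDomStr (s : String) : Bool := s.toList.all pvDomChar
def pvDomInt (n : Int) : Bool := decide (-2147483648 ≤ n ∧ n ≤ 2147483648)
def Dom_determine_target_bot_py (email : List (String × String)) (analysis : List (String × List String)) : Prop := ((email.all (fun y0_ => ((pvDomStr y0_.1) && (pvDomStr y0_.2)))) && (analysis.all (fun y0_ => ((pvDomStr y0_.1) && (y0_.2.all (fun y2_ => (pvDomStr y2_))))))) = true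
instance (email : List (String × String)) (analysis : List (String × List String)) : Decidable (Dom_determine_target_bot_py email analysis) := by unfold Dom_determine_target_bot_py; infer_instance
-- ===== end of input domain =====

-- B replaces A's per-bot lambda-rule scan by a precomputed inverted keyword/recipient index and a priority list; alternative/idiomatic, same cost at this fixed rule set.

-- ===== PORT A =====
-- 'email.get("to") in {addr, addr}': a missing "to" (None) matches no address
def pvToInA (to_ : Option String) (addrs : List String) : Bool :=
  match to_ with
  | some t => addrs.contains t
  | none => false

def determine_target_bot_py (email : List (String × String)) (analysis : List (String × List String)) : String :=
  let kws : List String := ((PySem.Dict.mk analysis).get? "keywords").getD []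
  let to_ : Option String := (PySem.Dict.mk email).get? "to"
  -- the rules dict is a literal, so the 'for bot_name, conditions in rules.items()' loop with
  -- 'any(condition() for condition in conditions)' is transliterated rule by rule, in dict order
  if (kws.contains "invoice" || kws.contains "payment" || kws.contains "account" || pvToInA to_ ["accounts@gabanilogistics.com", "finance@gabanilogistics.com"]) then "finance_bot"
    else if (kws.contains "support" || kws.contains "help" || kws.contains "complaint" || (to_ == some "customers@gabanilogistics.com")) then "customer_service"
    else if (kws.contains "shipment" || kws.contains "quote" || kws.contains "carrier" || (to_ == some "freight@gabanilogistics.com")) then "freight_broker"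
    else if (kws.contains "document" || kws.contains "approval" || kws.contains "sign" || (to_ == some "doccontrol@gabanilogistics.com")) then "documents_manager"
    else if (kws.contains "driver" || kws.contains "schedule" || kws.contains "dispatch" || pvToInA to_ ["driver@gabanistore.com", "operations@gabanilogistics.com"]) then "operations_manager"
    else if (kws.contains "safety" || kws.contains "accident" || kws.contains "incident" || (to_ == some "safety@gabanistore.com")) then "safety_manager"
    else if (kws.contains "security" || kws.contains "breach" || kws.contains "investigation" || (to_ == some "security@gabanistore.com")) then "security_manager"
  else "customer_service"

-- ===== PORT B =====
-- the module-level dict literals of Source B (unique literal keys, so Dict.mk is the Python dict literal)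
def pvK2B : PySem.Dict String String := PySem.Dict.mk
  [("invoice", "finance_bot"), ("payment", "finance_bot"), ("account", "finance_bot"), ("support", "customer_service"), ("help", "customer_service"), ("complaint", "customer_service"), ("shipment", "freight_broker"), ("quote", "freight_broker"), ("carrier", "freight_broker"),
   ("document", "documents_manager"), ("approval", "documents_manager"), ("sign", "documents_manager"), ("driver", "operations_manager"), ("schedule", "operations_manager"), ("dispatch", "operations_manager"), ("safety", "safety_manager"), ("accident", "safety_manager"), ("incident", "safety_manager"), ("security", "security_manager"), ("breach", "security_manager"), ("investigation", "security_manager")]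

def pvR2B : PySem.Dict String String := PySem.Dict.mk
  [("accounts@gabanilogistics.com", "finance_bot"), ("finance@gabanilogistics.com", "finance_bot"), ("customers@gabanilogistics.com", "customer_service"), ("freight@gabanilogistics.com", "freight_broker"), ("doccontrol@gabanilogistics.com", "documents_manager"),
   ("driver@gabanistore.com", "operations_manager"), ("operations@gabanilogistics.com", "operations_manager"), ("safety@gabanistore.com", "safety_manager"), ("security@gabanistore.com", "security_manager")]

def pvPriority : List String :=
  ["finance_bot", "customer_service", "freight_broker", "documents_manager", "operations_manager", "safety_manager", "security_manager"]

def determine_target_bot_py_alt (email : List (String × String)) (analysis : List (String × List String)) : String :=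
  let kws : List String := ((PySem.Dict.mk analysis).get? "keywords").getD []
  -- for kw in keywords: bot = _KEYWORD_TO_BOT.get(kw); if bot is not None: candidates.add(bot)
  let cands0 : PySem.Set String := kws.foldl (fun s kw =>
      match pvK2B.get? kw with
      | some b => PySem.Set.add s b
      | none => s) PySem.Set.empty
  -- _RECIPIENT_TO_BOT.get(email.get("to")): a None key is never present, hence the Option match
  let cands : PySem.Set String :=
    match (PySem.Dict.mk email).get? "to" with
    | some t =>
        match pvR2B.get? t with
        | some b => PySem.Set.add cands0 b
        | none => cands0
    | none => cands0
  -- 'for bot in _PRIORITY: if bot in candidates: return bot' / 'return "customer_service"'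
  match pvPriority.find? (fun b => PySem.Set.contains cands b) with
  | some b => b
  | none => "customer_service"

-- ===== PRECONDITION & SPEC =====
def Spec_determine_target_bot_py (email : List (String × String)) (analysis : List (String × List String)) (out : String) : Prop := out = determine_target_bot_py_alt email analysis
instance (email : List (String × String)) (analysis : List (String × List String)) (out : String) : Decidable (Spec_determine_target_bot_py email analysis out) := by unfold Spec_determine_target_bot_py; infer_instance

-- ===== CLAIM (what is proved, stated in full; the proofs are below) =====
def Claim_equal_determine_target_bot_py : Prop := ∀ (email : List (String × String)) (analysis : List (String × List String)), Dom_determine_target_bot_py email analysis → Spec_determine_target_bot_py email analysis (determine_target_bot_py email analysis)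

-- ===== LEMMAS AND PROOFS =====

-- a successful lookup in a literal dict comes from one of its entries
theorem get?_mk_mem {κ ν : Type} [BEq κ] [LawfulBEq κ] (l : List (κ × ν)) (k : κ) (v : ν)
    (h : (PySem.Dict.mk l).get? k = some v) : (k, v) ∈ l := by
  induction l with
  | nil => simp [PySem.Dict.get?] at h
  | cons p t ih =>
    rw [show (p :: t) = ((p.1, p.2) :: t) by simp, PySem.Dict.get?_mk_cons] at h
    by_cases hk : p.1 == k
    · rw [if_pos hk] at h
      obtain rfl := eq_of_beq hk
      obtain rfl := Option.some.inj h
      exact List.mem_cons_self ..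
    · rw [if_neg hk] at h
      exact List.mem_cons_of_mem _ (ih h)

-- B's candidate set, as built by determine_target_bot_py_alt (proof helper)
def pvCands (kws : List String) (to_ : Option String) : PySem.Set String :=
  let cands0 : PySem.Set String := kws.foldl (fun s kw =>
      match pvK2B.get? kw with
      | some b => PySem.Set.add s b
      | none => s) PySem.Set.empty
  match to_ with
  | some t =>
      match pvR2B.get? t with
      | some b => PySem.Set.add cands0 b
      | none => cands0
  | none => cands0

theorem alt_eq (email : List (String × String)) (analysis : List (String × List String)) :
    determine_target_bot_py_alt email analysis =
      match pvPriority.find? (fun b => PySem.Set.contains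
        (pvCands (((PySem.Dict.mk analysis).get? "keywords").getD []) ((PySem.Dict.mk email).get? "to")) b) with
      | some b => b
      | none => "customer_service" := rfl

theorem mem_foldCands (kws : List String) (s : PySem.Set String) (x : String) :
    x ∈ kws.foldl (fun s kw =>
      match pvK2B.get? kw with
      | some b => PySem.Set.add s b
      | none => s) s ↔ x ∈ s ∨ ∃ kw ∈ kws, pvK2B.get? kw = some x := by
  induction kws generalizing s with
  | nil => simp
  | cons a t ih =>
    simp only [List.foldl_cons]
    cases h : pvK2B.get? a with
    | none =>
      rw [ih]
      simp only [List.mem_cons]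
      constructor
      · rintro (hx | ⟨kw, hkw, hk⟩)
        · tauto
        · exact Or.inr ⟨kw, Or.inr hkw, hk⟩
      · rintro (hx | ⟨kw, (rfl | hkw), hk⟩)
        · tauto
        · rw [h] at hk; cases hk
        · exact Or.inr ⟨kw, hkw, hk⟩
    | some b =>
      rw [ih]
      simp only [PySem.Set.mem_add, List.mem_cons]
      constructor
      · rintro ((hx | rfl) | ⟨kw, hkw, hk⟩)
        · tauto
        · exact Or.inr ⟨a, Or.inl rfl, h⟩
        · exact Or.inr ⟨kw, Or.inr hkw, hk⟩
      · rintro (hx | ⟨kw, (rfl | hkw), hk⟩)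
        · tauto
        · rw [h] at hk; exact Or.inl (Or.inr (Option.some.inj hk).symm)
        · exact Or.inr ⟨kw, hkw, hk⟩

theorem mem_pvCands (kws : List String) (to_ : Option String) (x : String) :
    x ∈ pvCands kws to_ ↔
      (∃ kw ∈ kws, pvK2B.get? kw = some x) ∨ (∃ t, to_ = some t ∧ pvR2B.get? t = some x) := by
  unfold pvCands
  cases to_ with
  | none => simp [mem_foldCands, PySem.Set.empty]
  | some t =>
    dsimp only
    cases h : pvR2B.get? t with
    | none =>
      simp [mem_foldCands, PySem.Set.empty, h]
    | some b =>
      simp only [mem_foldCands, PySem.Set.mem_add, PySem.Set.empty, List.not_mem_nil, false_or,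
        Option.some.injEq]
      constructor
      · rintro (hx | rfl)
        · exact Or.inl hx
        · exact Or.inr ⟨t, rfl, h⟩
      · rintro (hx | ⟨t', ht', hk⟩)
        · exact Or.inl hx
        · subst ht'
          rw [h] at hk
          exact Or.inr (Option.some.inj hk).symm

set_option maxHeartbeats 1000000 in
theorem cand_fin (kws : List String) (to_ : Option String) :
    PySem.Set.contains (pvCands kws to_) "finance_bot" =
      (kws.contains "invoice" || kws.contains "payment" || kws.contains "account" || pvToInA to_ ["accounts@gabanilogistics.com", "finance@gabanilogistics.com"]) := by
  rw [Bool.eq_iff_iff, PySem.Set.contains_iff, mem_pvCands]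
  constructor
  · rintro (⟨kw, hkw, h⟩ | ⟨t, rfl, h⟩)
    · have hm := get?_mk_mem _ _ _ h
      simp only [List.mem_cons, List.not_mem_nil, or_false, Prod.mk.injEq, String.reduceEq,
        and_false, and_true, false_or, or_false] at hm
      rcases hm with rfl | rfl | rfl <;> simp [hkw]
    · have hm := get?_mk_mem _ _ _ h
      simp only [List.mem_cons, List.not_mem_nil, or_false, Prod.mk.injEq, String.reduceEq,
        and_false, and_true, false_or, or_false] at hm
      rcases hm with rfl | rfl <;> simp [pvToInA]
  · intro h
    simp only [Bool.or_eq_true] at h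
    rcases h with ((h | h) | h) | h
    · exact Or.inl ⟨"invoice", by simpa using h, rfl⟩
    · exact Or.inl ⟨"payment", by simpa using h, rfl⟩
    · exact Or.inl ⟨"account", by simpa using h, rfl⟩
    · cases to_ with
      | none => cases h
      | some t =>
        simp only [pvToInA, List.contains_eq_mem, decide_eq_true_eq, List.mem_cons, List.not_mem_nil, or_false] at h
        rcases h with rfl | rfl
        · exact Or.inr ⟨_, rfl, rfl⟩
        · exact Or.inr ⟨_, rfl, rfl⟩

set_option maxHeartbeats 1000000 in
theorem cand_cs (kws : List String) (to_ : Option String) :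
    PySem.Set.contains (pvCands kws to_) "customer_service" =
      (kws.contains "support" || kws.contains "help" || kws.contains "complaint" || (to_ == some "customers@gabanilogistics.com")) := by
  rw [Bool.eq_iff_iff, PySem.Set.contains_iff, mem_pvCands]
  constructor
  · rintro (⟨kw, hkw, h⟩ | ⟨t, rfl, h⟩)
    · have hm := get?_mk_mem _ _ _ h
      simp only [List.mem_cons, List.not_mem_nil, or_false, Prod.mk.injEq, String.reduceEq,
        and_false, and_true, false_or, or_false] at hm
      rcases hm with rfl | rfl | rfl <;> simp [hkw]
    · have hm := get?_mk_mem _ _ _ h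
      simp only [List.mem_cons, List.not_mem_nil, or_false, Prod.mk.injEq, String.reduceEq,
        and_false, and_true, false_or, or_false] at hm
      obtain rfl := hm
      simp
  · intro h
    simp only [Bool.or_eq_true] at h
    rcases h with ((h | h) | h) | h
    · exact Or.inl ⟨"support", by simpa using h, rfl⟩
    · exact Or.inl ⟨"help", by simpa using h, rfl⟩
    · exact Or.inl ⟨"complaint", by simpa using h, rfl⟩
    · cases to_ with
      | none => cases h
      | some t =>
        obtain rfl := Option.some.inj (eq_of_beq h)
        exact Or.inr ⟨_, rfl, rfl⟩

set_option maxHeartbeats 1000000 in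
theorem cand_fb (kws : List String) (to_ : Option String) :
    PySem.Set.contains (pvCands kws to_) "freight_broker" =
      (kws.contains "shipment" || kws.contains "quote" || kws.contains "carrier" || (to_ == some "freight@gabanilogistics.com")) := by
  rw [Bool.eq_iff_iff, PySem.Set.contains_iff, mem_pvCands]
  constructor
  · rintro (⟨kw, hkw, h⟩ | ⟨t, rfl, h⟩)
    · have hm := get?_mk_mem _ _ _ h
      simp only [List.mem_cons, List.not_mem_nil, or_false, Prod.mk.injEq, String.reduceEq,
        and_false, and_true, false_or, or_false] at hm
      rcases hm with rfl | rfl | rfl <;> simp [hkw]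
    · have hm := get?_mk_mem _ _ _ h
      simp only [List.mem_cons, List.not_mem_nil, or_false, Prod.mk.injEq, String.reduceEq,
        and_false, and_true, false_or, or_false] at hm
      obtain rfl := hm
      simp
  · intro h
    simp only [Bool.or_eq_true] at h
    rcases h with ((h | h) | h) | h
    · exact Or.inl ⟨"shipment", by simpa using h, rfl⟩
    · exact Or.inl ⟨"quote", by simpa using h, rfl⟩
    · exact Or.inl ⟨"carrier", by simpa using h, rfl⟩
    · cases to_ with
      | none => cases h
      | some t =>
        obtain rfl := Option.some.inj (eq_of_beq h)
        exact Or.inr ⟨_, rfl, rfl⟩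

set_option maxHeartbeats 1000000 in
theorem cand_dm (kws : List String) (to_ : Option String) :
    PySem.Set.contains (pvCands kws to_) "documents_manager" =
      (kws.contains "document" || kws.contains "approval" || kws.contains "sign" || (to_ == some "doccontrol@gabanilogistics.com")) := by
  rw [Bool.eq_iff_iff, PySem.Set.contains_iff, mem_pvCands]
  constructor
  · rintro (⟨kw, hkw, h⟩ | ⟨t, rfl, h⟩)
    · have hm := get?_mk_mem _ _ _ h
      simp only [List.mem_cons, List.not_mem_nil, or_false, Prod.mk.injEq, String.reduceEq,
        and_false, and_true, false_or, or_false] at hm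
      rcases hm with rfl | rfl | rfl <;> simp [hkw]
    · have hm := get?_mk_mem _ _ _ h
      simp only [List.mem_cons, List.not_mem_nil, or_false, Prod.mk.injEq, String.reduceEq,
        and_false, and_true, false_or, or_false] at hm
      obtain rfl := hm
      simp
  · intro h
    simp only [Bool.or_eq_true] at h
    rcases h with ((h | h) | h) | h
    · exact Or.inl ⟨"document", by simpa using h, rfl⟩
    · exact Or.inl ⟨"approval", by simpa using h, rfl⟩
    · exact Or.inl ⟨"sign", by simpa using h, rfl⟩
    · cases to_ with
      | none => cases h
      | some t =>
        obtain rfl := Option.some.inj (eq_of_beq h)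
        exact Or.inr ⟨_, rfl, rfl⟩

set_option maxHeartbeats 1000000 in
theorem cand_om (kws : List String) (to_ : Option String) :
    PySem.Set.contains (pvCands kws to_) "operations_manager" =
      (kws.contains "driver" || kws.contains "schedule" || kws.contains "dispatch" || pvToInA to_ ["driver@gabanistore.com", "operations@gabanilogistics.com"]) := by
  rw [Bool.eq_iff_iff, PySem.Set.contains_iff, mem_pvCands]
  constructor
  · rintro (⟨kw, hkw, h⟩ | ⟨t, rfl, h⟩)
    · have hm := get?_mk_mem _ _ _ h
      simp only [List.mem_cons, List.not_mem_nil, or_false, Prod.mk.injEq, String.reduceEq,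
        and_false, and_true, false_or, or_false] at hm
      rcases hm with rfl | rfl | rfl <;> simp [hkw]
    · have hm := get?_mk_mem _ _ _ h
      simp only [List.mem_cons, List.not_mem_nil, or_false, Prod.mk.injEq, String.reduceEq,
        and_false, and_true, false_or, or_false] at hm
      rcases hm with rfl | rfl <;> simp [pvToInA]
  · intro h
    simp only [Bool.or_eq_true] at h
    rcases h with ((h | h) | h) | h
    · exact Or.inl ⟨"driver", by simpa using h, rfl⟩
    · exact Or.inl ⟨"schedule", by simpa using h, rfl⟩
    · exact Or.inl ⟨"dispatch", by simpa using h, rfl⟩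
    · cases to_ with
      | none => cases h
      | some t =>
        simp only [pvToInA, List.contains_eq_mem, decide_eq_true_eq, List.mem_cons, List.not_mem_nil, or_false] at h
        rcases h with rfl | rfl
        · exact Or.inr ⟨_, rfl, rfl⟩
        · exact Or.inr ⟨_, rfl, rfl⟩

set_option maxHeartbeats 1000000 in
theorem cand_sm (kws : List String) (to_ : Option String) :
    PySem.Set.contains (pvCands kws to_) "safety_manager" =
      (kws.contains "safety" || kws.contains "accident" || kws.contains "incident" || (to_ == some "safety@gabanistore.com")) := by
  rw [Bool.eq_iff_iff, PySem.Set.contains_iff, mem_pvCands]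
  constructor
  · rintro (⟨kw, hkw, h⟩ | ⟨t, rfl, h⟩)
    · have hm := get?_mk_mem _ _ _ h
      simp only [List.mem_cons, List.not_mem_nil, or_false, Prod.mk.injEq, String.reduceEq,
        and_false, and_true, false_or, or_false] at hm
      rcases hm with rfl | rfl | rfl <;> simp [hkw]
    · have hm := get?_mk_mem _ _ _ h
      simp only [List.mem_cons, List.not_mem_nil, or_false, Prod.mk.injEq, String.reduceEq,
        and_false, and_true, false_or, or_false] at hm
      obtain rfl := hm
      simp
  · intro h
    simp only [Bool.or_eq_true] at h
    rcases h with ((h | h) | h) | h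
    · exact Or.inl ⟨"safety", by simpa using h, rfl⟩
    · exact Or.inl ⟨"accident", by simpa using h, rfl⟩
    · exact Or.inl ⟨"incident", by simpa using h, rfl⟩
    · cases to_ with
      | none => cases h
      | some t =>
        obtain rfl := Option.some.inj (eq_of_beq h)
        exact Or.inr ⟨_, rfl, rfl⟩

set_option maxHeartbeats 1000000 in
theorem cand_sec (kws : List String) (to_ : Option String) :
    PySem.Set.contains (pvCands kws to_) "security_manager" =
      (kws.contains "security" || kws.contains "breach" || kws.contains "investigation" || (to_ == some "security@gabanistore.com")) := by
  rw [Bool.eq_iff_iff, PySem.Set.contains_iff, mem_pvCands]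
  constructor
  · rintro (⟨kw, hkw, h⟩ | ⟨t, rfl, h⟩)
    · have hm := get?_mk_mem _ _ _ h
      simp only [List.mem_cons, List.not_mem_nil, or_false, Prod.mk.injEq, String.reduceEq,
        and_false, and_true, false_or, or_false] at hm
      rcases hm with rfl | rfl | rfl <;> simp [hkw]
    · have hm := get?_mk_mem _ _ _ h
      simp only [List.mem_cons, List.not_mem_nil, or_false, Prod.mk.injEq, String.reduceEq,
        and_false, and_true, false_or, or_false] at hm
      obtain rfl := hm
      simp
  · intro h
    simp only [Bool.or_eq_true] at h
    rcases h with ((h | h) | h) | h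
    · exact Or.inl ⟨"security", by simpa using h, rfl⟩
    · exact Or.inl ⟨"breach", by simpa using h, rfl⟩
    · exact Or.inl ⟨"investigation", by simpa using h, rfl⟩
    · cases to_ with
      | none => cases h
      | some t =>
        obtain rfl := Option.some.inj (eq_of_beq h)
        exact Or.inr ⟨_, rfl, rfl⟩

theorem decide_mem_eq_contains (s : PySem.Set String) (x : String) :
    decide (x ∈ s) = PySem.Set.contains s x := by
  cases hc : PySem.Set.contains s x
  · simp only [decide_eq_false_iff_not]
    intro hx
    rw [(PySem.Set.contains_iff s x).mpr hx] at hc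
    cases hc
  · simp [(PySem.Set.contains_iff s x).mp hc]

theorem findPriority (s : PySem.Set String) :
    (match pvPriority.find? (fun b => PySem.Set.contains s b) with
     | some b => b
     | none => "customer_service") =
      (if PySem.Set.contains s "finance_bot" then "finance_bot"
            else if PySem.Set.contains s "customer_service" then "customer_service"
            else if PySem.Set.contains s "freight_broker" then "freight_broker"
            else if PySem.Set.contains s "documents_manager" then "documents_manager"
            else if PySem.Set.contains s "operations_manager" then "operations_manager"
            else if PySem.Set.contains s "safety_manager" then "safety_manager"
            else if PySem.Set.contains s "security_manager" then "security_manager"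
      else "customer_service") := by
  cases h0 : PySem.Set.contains s "finance_bot" with
  | true =>
    rw [← decide_mem_eq_contains] at h0
    simp [pvPriority, List.find?, h0]
  | false =>
    cases h1 : PySem.Set.contains s "customer_service" with
    | true =>
      rw [← decide_mem_eq_contains] at h0 h1
      simp [pvPriority, List.find?, h0, h1]
    | false =>
      cases h2 : PySem.Set.contains s "freight_broker" with
      | true =>
        rw [← decide_mem_eq_contains] at h0 h1 h2
        simp [pvPriority, List.find?, h0, h1, h2]
      | false =>
        cases h3 : PySem.Set.contains s "documents_manager" with
        | true =>
          rw [← decide_mem_eq_contains] at h0 h1 h2 h3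
          simp [pvPriority, List.find?, h0, h1, h2, h3]
        | false =>
          cases h4 : PySem.Set.contains s "operations_manager" with
          | true =>
            rw [← decide_mem_eq_contains] at h0 h1 h2 h3 h4
            simp [pvPriority, List.find?, h0, h1, h2, h3, h4]
          | false =>
            cases h5 : PySem.Set.contains s "safety_manager" with
            | true =>
              rw [← decide_mem_eq_contains] at h0 h1 h2 h3 h4 h5
              simp [pvPriority, List.find?, h0, h1, h2, h3, h4, h5]
            | false =>
              cases h6 : PySem.Set.contains s "security_manager" with
              | true =>
                rw [← decide_mem_eq_contains] at h0 h1 h2 h3 h4 h5 h6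
                simp [pvPriority, List.find?, h0, h1, h2, h3, h4, h5, h6]
              | false =>
                rw [← decide_mem_eq_contains] at h0 h1 h2 h3 h4 h5 h6
                simp [pvPriority, List.find?, h0, h1, h2, h3, h4, h5, h6]

-- the shared extractions (proof helpers)
def pvKws (analysis : List (String × List String)) : List String :=
  ((PySem.Dict.mk analysis).get? "keywords").getD []
def pvTo (email : List (String × String)) : Option String :=
  (PySem.Dict.mk email).get? "to"

theorem a_eq (email : List (String × String)) (analysis : List (String × List String)) :
    determine_target_bot_py email analysis =
      (if ((pvKws analysis).contains "invoice" || (pvKws analysis).contains "payment" || (pvKws analysis).contains "account" || pvToInA (pvTo email) ["accounts@gabanilogistics.com", "finance@gabanilogistics.com"]) then "finance_bot"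
            else if ((pvKws analysis).contains "support" || (pvKws analysis).contains "help" || (pvKws analysis).contains "complaint" || ((pvTo email) == some "customers@gabanilogistics.com")) then "customer_service"
            else if ((pvKws analysis).contains "shipment" || (pvKws analysis).contains "quote" || (pvKws analysis).contains "carrier" || ((pvTo email) == some "freight@gabanilogistics.com")) then "freight_broker"
            else if ((pvKws analysis).contains "document" || (pvKws analysis).contains "approval" || (pvKws analysis).contains "sign" || ((pvTo email) == some "doccontrol@gabanilogistics.com")) then "documents_manager"
            else if ((pvKws analysis).contains "driver" || (pvKws analysis).contains "schedule" || (pvKws analysis).contains "dispatch" || pvToInA (pvTo email) ["driver@gabanistore.com", "operations@gabanilogistics.com"]) then "operations_manager"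
            else if ((pvKws analysis).contains "safety" || (pvKws analysis).contains "accident" || (pvKws analysis).contains "incident" || ((pvTo email) == some "safety@gabanistore.com")) then "safety_manager"
            else if ((pvKws analysis).contains "security" || (pvKws analysis).contains "breach" || (pvKws analysis).contains "investigation" || ((pvTo email) == some "security@gabanistore.com")) then "security_manager"
      else "customer_service") := rfl

-- ===== VERDICT (by name: the statement is the Claim_ definition above) =====
theorem determine_target_bot_py_spec : Claim_equal_determine_target_bot_py := by
  intro email analysis _
  unfold Spec_determine_target_bot_py
  rw [a_eq, alt_eq, findPriority]
  rw [show ((PySem.Dict.mk analysis).get? "keywords").getD [] = pvKws analysis from rfl,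
      show (PySem.Dict.mk email).get? "to" = pvTo email from rfl]
  rw [cand_fin, cand_cs, cand_fb, cand_dm, cand_om, cand_sm, cand_sec]
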